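-- pv_equiv track=rewrite | github.com/jhaanand81/Reel | backend/test_kokoro_voiceover.py | select_voice_for_content
-- ===== SOURCE A (Python) =====
-- def select_voice_for_content(script, category=None):
--     """Select best voice based on script content or category"""
--     script_lower = script.lower()
--
--     # Category-based selection
--     category_voice_map = {
--         "beauty": "af_river",      # Calm, soothing for skincare/beauty
--         "skincare": "af_river",
--         "wellness": "af_bella",    # Warm for wellness
--         "fitness": "af_sky",       # Energetic for fitness
--         "tech": "af_sarah",        # Professional for tech
--         "luxury": "af_nova",       # Modern for luxury
--         "food": "af_nicole",       # Friendly for food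
--         "automotive": "am_adam",   # Authoritative for cars
--         "finance": "am_adam",      # Serious for finance
--         "lifestyle": "af_bella",   # Warm for lifestyle
--         "nature": "af_river",      # Soothing for nature
--         "inspirational": "af_heart",  # Emotional for inspiration
--     }
--
--     if category and category.lower() in category_voice_map:
--         return category_voice_map[category.lower()]
--
--     # Content-based detection
--     if any(word in script_lower for word in ["skincare", "beauty", "glow", "spa", "botanical", "serum"]):
--         return "af_river"  # Calm, soothing
--     elif any(word in script_lower for word in ["energy", "workout", "fitness", "power", "dynamic"]):
--         return "af_sky"  # Youthful, energetic
--     elif any(word in script_lower for word in ["luxury", "premium", "elegant", "sophisticated"]):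
--         return "af_nova"  # Modern, engaging
--     elif any(word in script_lower for word in ["tech", "innovation", "smart", "digital"]):
--         return "af_sarah"  # Clear, professional
--     elif any(word in script_lower for word in ["story", "journey", "heritage", "tradition"]):
--         return "af_aoede"  # Storytelling
--     elif any(word in script_lower for word in ["inspire", "dream", "believe", "heart"]):
--         return "af_heart"  # Emotional, expressive
--
--     # Default: af_heart (most natural and expressive)
--     return "af_heart"
-- ===== SOURCE B (Python) =====
-- CATEGORY_VOICE_MAP = {
--     "beauty": "af_river",
--     "skincare": "af_river",
--     "wellness": "af_bella",
--     "fitness": "af_sky",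
--     "tech": "af_sarah",
--     "luxury": "af_nova",
--     "food": "af_nicole",
--     "automotive": "am_adam",
--     "finance": "am_adam",
--     "lifestyle": "af_bella",
--     "nature": "af_river",
--     "inspirational": "af_heart",
-- }
--
-- # One flat keyword -> priority map (lower priority wins); the voice for each priority.
-- PRIORITY_VOICES = ["af_river", "af_sky", "af_nova", "af_sarah", "af_aoede", "af_heart"]
-- KEYWORD_PRIORITY = {
--     "skincare": 0, "beauty": 0, "glow": 0, "spa": 0, "botanical": 0, "serum": 0,
--     "energy": 1, "workout": 1, "fitness": 1, "power": 1, "dynamic": 1,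
--     "luxury": 2, "premium": 2, "elegant": 2, "sophisticated": 2,
--     "tech": 3, "innovation": 3, "smart": 3, "digital": 3,
--     "story": 4, "journey": 4, "heritage": 4, "tradition": 4,
--     "inspire": 5, "dream": 5, "believe": 5, "heart": 5,
-- }
--
-- def select_voice_for_content(script, category=None):
--     """Select best voice based on script content or category"""
--     if category:
--         voice = CATEGORY_VOICE_MAP.get(category.lower())
--         if voice is not None:
--             return voice
--     script_lower = script.lower()
--     best = min((p for kw, p in KEYWORD_PRIORITY.items() if kw in script_lower),
--                default=None)
--     return "af_heart" if best is None else PRIORITY_VOICES[best]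
-- ===== Notes on version B (the rewrite author's own statement) =====
-- stated objective: alternative
-- what changed: Instead of A's ordered if/elif chain of per-group any() checks, B flattens all keywords into one keyword->priority map, computes the minimum priority among keywords occurring in the lowered script in a single aggregation (min with default None), and indexes a priority->voice list; the category lookup uses dict.get.
import Mathlib
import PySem

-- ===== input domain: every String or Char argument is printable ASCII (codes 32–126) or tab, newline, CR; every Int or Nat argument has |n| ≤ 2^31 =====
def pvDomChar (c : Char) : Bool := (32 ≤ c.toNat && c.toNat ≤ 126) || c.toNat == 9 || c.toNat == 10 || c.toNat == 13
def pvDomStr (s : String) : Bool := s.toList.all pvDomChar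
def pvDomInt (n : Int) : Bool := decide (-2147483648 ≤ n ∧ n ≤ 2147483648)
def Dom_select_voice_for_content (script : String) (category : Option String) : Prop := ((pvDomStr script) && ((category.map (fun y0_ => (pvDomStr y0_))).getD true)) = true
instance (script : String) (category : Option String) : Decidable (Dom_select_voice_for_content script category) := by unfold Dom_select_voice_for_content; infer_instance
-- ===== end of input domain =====

-- B replaces A's ordered if/elif chain of group checks by a min-priority aggregation
-- over one flat keyword -> priority map (alternative decomposition; same cost).

-- ===== PORT A =====
-- the literal dict of A, in insertion order
def pvCatMapA : PySem.Dict String String := PySem.Dict.ofList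
  [("beauty", "af_river"), ("skincare", "af_river"), ("wellness", "af_bella"),
   ("fitness", "af_sky"), ("tech", "af_sarah"), ("luxury", "af_nova"),
   ("food", "af_nicole"), ("automotive", "am_adam"), ("finance", "am_adam"),
   ("lifestyle", "af_bella"), ("nature", "af_river"), ("inspirational", "af_heart")]

def select_voice_for_content (script : String) (category : Option String) : String :=
  let script_lower := PySem.Str.lower script
  -- 'if category and category.lower() in map: return map[category.lower()]'
  match category with
  | some c =>
    if c ≠ "" && pvCatMapA.contains (PySem.Str.lower c) then
      pvCatMapA.getD (PySem.Str.lower c) ""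
    else
      select_voice_keywords script_lower
  | none => select_voice_keywords script_lower
where
  -- the if/elif chain on the lowered script
  select_voice_keywords (sl : String) : String :=
    if (["skincare", "beauty", "glow", "spa", "botanical", "serum"]).any (fun w => PySem.Str.isIn w sl) then "af_river"
    else if (["energy", "workout", "fitness", "power", "dynamic"]).any (fun w => PySem.Str.isIn w sl) then "af_sky"
    else if (["luxury", "premium", "elegant", "sophisticated"]).any (fun w => PySem.Str.isIn w sl) then "af_nova"
    else if (["tech", "innovation", "smart", "digital"]).any (fun w => PySem.Str.isIn w sl) then "af_sarah"
    else if (["story", "journey", "heritage", "tradition"]).any (fun w => PySem.Str.isIn w sl) then "af_aoede"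
    else if (["inspire", "dream", "believe", "heart"]).any (fun w => PySem.Str.isIn w sl) then "af_heart"
    else "af_heart"

-- ===== PORT B =====
def pvCatMapB : PySem.Dict String String := PySem.Dict.ofList
  [("beauty", "af_river"), ("skincare", "af_river"), ("wellness", "af_bella"),
   ("fitness", "af_sky"), ("tech", "af_sarah"), ("luxury", "af_nova"),
   ("food", "af_nicole"), ("automotive", "am_adam"), ("finance", "am_adam"),
   ("lifestyle", "af_bella"), ("nature", "af_river"), ("inspirational", "af_heart")]

-- PRIORITY_VOICES
def pvPriorityVoices : List String :=
  ["af_river", "af_sky", "af_nova", "af_sarah", "af_aoede", "af_heart"]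

-- KEYWORD_PRIORITY.items(), in insertion order
def pvKwPrio : List (String × Nat) :=
  [("skincare", 0), ("beauty", 0), ("glow", 0), ("spa", 0), ("botanical", 0), ("serum", 0),
   ("energy", 1), ("workout", 1), ("fitness", 1), ("power", 1), ("dynamic", 1),
   ("luxury", 2), ("premium", 2), ("elegant", 2), ("sophisticated", 2),
   ("tech", 3), ("innovation", 3), ("smart", 3), ("digital", 3),
   ("story", 4), ("journey", 4), ("heritage", 4), ("tradition", 4),
   ("inspire", 5), ("dream", 5), ("believe", 5), ("heart", 5)]

-- 'min(generator, default=None)': running minimum over the matched priorities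
def pvStep (sl : String) (acc : Option Nat) (kp : String × Nat) : Option Nat :=
  if PySem.Str.isIn kp.1 sl then
    some (match acc with | none => kp.2 | some m => min m kp.2)
  else acc

def pvBest (sl : String) : Option Nat :=
  pvKwPrio.foldl (pvStep sl) none

def select_voice_for_content_alt (script : String) (category : Option String) : String :=
  match category with
  | some c =>
    if c ≠ "" then
      match pvCatMapB.get? (PySem.Str.lower c) with
      | some voice => voice
      | none => pvFromBest (PySem.Str.lower script)
    else pvFromBest (PySem.Str.lower script)
  | none => pvFromBest (PySem.Str.lower script)
where
  -- '"af_heart" if best is None else PRIORITY_VOICES[best]'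
  pvFromBest (sl : String) : String :=
    match pvBest sl with
    | none => "af_heart"
    | some p => (PySem.List.pyGet? pvPriorityVoices (Int.ofNat p)).getD "af_heart"

-- ===== PRECONDITION & SPEC =====
def Spec_select_voice_for_content (script : String) (category : Option String) (out : String) : Prop := out = select_voice_for_content_alt script category
instance (script : String) (category : Option String) (out : String) : Decidable (Spec_select_voice_for_content script category out) := by unfold Spec_select_voice_for_content; infer_instance

-- ===== CLAIM =====
def Claim_equal_select_voice_for_content : Prop := ∀ (script : String) (category : Option String), Dom_select_voice_for_content script category → Spec_select_voice_for_content script category (select_voice_for_content script category)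

-- ===== LEMMAS AND PROOFS =====
-- folding one group of keywords that all carry the same priority p
theorem pvFold_group (sl : String) (p : Nat) (kws : List String) (acc : Option Nat) :
    List.foldl (pvStep sl) acc (kws.map (fun k => (k, p))) =
      if kws.any (fun w => PySem.Str.isIn w sl) then
        some (match acc with | none => p | some m => min m p)
      else acc := by
  induction kws generalizing acc with
  | nil => simp
  | cons k rest ih =>
    simp only [List.map, List.foldl, List.any_cons]
    by_cases hk : PySem.Str.isIn k sl = true
    · simp only [pvStep, hk, if_true, ih, Bool.true_or, if_true]
      cases acc with
      | none =>
        cases hr : rest.any (fun w => PySem.Str.isIn w sl)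
        · simp
        · simp [min_self]
      | some m =>
        cases hr : rest.any (fun w => PySem.Str.isIn w sl)
        · simp
        · simp [min_assoc, min_self]
    · simp only [pvStep, hk, ih, Bool.false_or]
      simp

-- the key step: the if/elif chain equals the min-priority aggregation
theorem pvKeywords_eq_best (sl : String) :
    select_voice_for_content.select_voice_keywords sl =
      select_voice_for_content_alt.pvFromBest sl := by
  have hsplit : pvKwPrio =
      (["skincare", "beauty", "glow", "spa", "botanical", "serum"].map (fun k => (k, 0))) ++
      (["energy", "workout", "fitness", "power", "dynamic"].map (fun k => (k, 1))) ++
      (["luxury", "premium", "elegant", "sophisticated"].map (fun k => (k, 2))) ++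
      (["tech", "innovation", "smart", "digital"].map (fun k => (k, 3))) ++
      (["story", "journey", "heritage", "tradition"].map (fun k => (k, 4))) ++
      (["inspire", "dream", "believe", "heart"].map (fun k => (k, 5))) := rfl
  unfold select_voice_for_content.select_voice_keywords
    select_voice_for_content_alt.pvFromBest pvBest
  rw [hsplit]
  rw [List.foldl_append, List.foldl_append, List.foldl_append, List.foldl_append,
      List.foldl_append]
  rw [pvFold_group, pvFold_group, pvFold_group, pvFold_group, pvFold_group, pvFold_group]
  generalize (["skincare", "beauty", "glow", "spa", "botanical", "serum"]).any (fun w => PySem.Str.isIn w sl) = g0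
  generalize (["energy", "workout", "fitness", "power", "dynamic"]).any (fun w => PySem.Str.isIn w sl) = g1
  generalize (["luxury", "premium", "elegant", "sophisticated"]).any (fun w => PySem.Str.isIn w sl) = g2
  generalize (["tech", "innovation", "smart", "digital"]).any (fun w => PySem.Str.isIn w sl) = g3
  generalize (["story", "journey", "heritage", "tradition"]).any (fun w => PySem.Str.isIn w sl) = g4
  generalize (["inspire", "dream", "believe", "heart"]).any (fun w => PySem.Str.isIn w sl) = g5
  cases g0 <;> cases g1 <;> cases g2 <;> cases g3 <;> cases g4 <;> cases g5 <;> rfl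

theorem pvEq (script : String) (category : Option String) :
    select_voice_for_content script category = select_voice_for_content_alt script category := by
  unfold select_voice_for_content select_voice_for_content_alt
  cases category with
  | none => exact pvKeywords_eq_best _
  | some c =>
    by_cases hc : c = ""
    · subst hc; simp [pvKeywords_eq_best]
    · simp only [hc, ne_eq, not_false_eq_true, decide_true, Bool.true_and, if_true]
      rw [show pvCatMapB = pvCatMapA from rfl]
      rw [PySem.Dict.contains_eq_isSome_get?]
      cases hg : pvCatMapA.get? (PySem.Str.lower c) with
      | none => simp [pvKeywords_eq_best]
      | some v => simp [PySem.Dict.getD_eq_get?_getD, hg]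

-- ===== VERDICT =====
theorem select_voice_for_content_spec : Claim_equal_select_voice_for_content := by
  intro script category _
  unfold Spec_select_voice_for_content
  exact pvEq script category
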